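-- pv_equiv track=rewrite | github.com/AlexKom9/nuwm-pyton | lab_4/prices.py | recalculate_prices
-- ===== SOURCE A (Python) =====
-- from typing import List
--
-- def recalculate_prices(prices: List[int]):
--     if not len(prices):
--         return []
--
--     price = prices[0]
--
--     def getByIndex(list: List[int], index: int):
--         return list[index] if index < len(list) else 0
--
--     discount_index = 1
--     discount = getByIndex(prices, discount_index)
--
--     while discount_index < len(prices) and (discount > price or discount == 0):
--         discount_index += 1
--         discount = getByIndex(prices, discount_index)
--
--     return [price - discount, *recalculate_prices(prices[1:])]
-- ===== SOURCE B (Python) =====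
-- def recalculate_prices(prices):
--     # One right-to-left pass with a monotonic stack (next element <= price, zeros
--     # skipped) plus a "nearest negative" tracker for zero prices.
--     stack = []     # nonzero values, increasing toward the top (= end of list)
--     last_neg = 0   # nearest negative element seen so far (0 = none)
--     out = []
--     for p in reversed(prices):
--         if p == 0:
--             d = last_neg
--         else:
--             while stack and stack[-1] > p:
--                 stack.pop()
--             d = stack[-1] if stack else 0
--             stack.append(p)
--             if p < 0:
--                 last_neg = p
--         out.append(p - d)
--     out.reverse()
--     return out
-- ===== Notes on version B (the rewrite author's own statement) =====
-- stated objective: faster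
-- what changed: Replaces A's per-element recursion that rescans the whole tail (and copies it with prices[1:]) by a single right-to-left pass maintaining a monotonic stack of nonzero values plus a nearest-negative tracker for zero prices.
import Mathlib
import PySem

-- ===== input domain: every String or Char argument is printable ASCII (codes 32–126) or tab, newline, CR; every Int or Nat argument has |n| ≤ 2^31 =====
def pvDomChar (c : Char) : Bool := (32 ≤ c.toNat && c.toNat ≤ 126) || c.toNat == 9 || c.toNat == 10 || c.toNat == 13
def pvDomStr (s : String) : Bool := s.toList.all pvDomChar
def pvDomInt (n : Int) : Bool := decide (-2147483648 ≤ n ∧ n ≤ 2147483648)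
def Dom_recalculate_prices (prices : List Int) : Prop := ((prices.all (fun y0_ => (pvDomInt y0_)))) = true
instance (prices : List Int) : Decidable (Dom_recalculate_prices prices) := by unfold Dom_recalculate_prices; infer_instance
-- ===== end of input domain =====

-- B replaces A's quadratic rescan-per-element recursion by a single right-to-left
-- monotonic-stack pass (objective: faster, amortised O(n)).

-- ===== PORT A =====
-- getByIndex(list, index): list[index] if index < len(list) else 0  (index is a
-- nonnegative counter in A, so a Nat index is exact here)
def pvGetByIndex (l : List Int) (i : Nat) : Int :=
  if i < l.length then l.getD i 0 else 0

-- the while loop: advance discount_index while discount > price or discount == 0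
def pvWhileA (prices : List Int) (price : Int) (di : Nat) : Int :=
  let d := pvGetByIndex prices di
  if di < prices.length ∧ (d > price ∨ d = 0) then
    pvWhileA prices price (di + 1)
  else d
termination_by prices.length - di
decreasing_by omega

def recalculate_prices (prices : List Int) : List Int :=
  match prices with
  | [] => []
  | price :: rest =>
      -- discount_index starts at 1; prices[1:] = rest
      (price - pvWhileA (price :: rest) price 1) :: recalculate_prices rest

-- ===== PORT B =====
-- Python's `while stack and stack[-1] > p: stack.pop()`; the Lean list keeps the
-- stack top at the HEAD (mirroring the Python list's end), so pop = drop the head.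
def pvPopB (p : Int) : List Int → List Int
  | [] => []
  | t :: st => if t > p then pvPopB p st else t :: st

-- one iteration of the `for p in reversed(prices)` body on state (out, stack, last_neg)
def pvStepB (acc : List Int × List Int × Int) (p : Int) : List Int × List Int × Int :=
  let (out, st, lastNeg) := acc
  if p = 0 then
    (out ++ [p - lastNeg], st, lastNeg)
  else
    let st' := pvPopB p st
    let d := st'.headD 0
    (out ++ [p - d], p :: st', if p < 0 then p else lastNeg)

def recalculate_prices_alt (prices : List Int) : List Int :=
  (prices.reverse.foldl pvStepB ([], [], 0)).1.reverse

-- ===== PRECONDITION & SPEC =====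
def Spec_recalculate_prices (prices : List Int) (out : List Int) : Prop := out = recalculate_prices_alt prices
instance (prices : List Int) (out : List Int) : Decidable (Spec_recalculate_prices prices out) := by unfold Spec_recalculate_prices; infer_instance

-- ===== CLAIM (what is proved, stated in full; the proofs are below) =====
def Claim_equal_recalculate_prices : Prop := ∀ (prices : List Int), Dom_recalculate_prices prices → Spec_recalculate_prices prices (recalculate_prices prices)

-- ===== LEMMAS AND PROOFS =====

-- the common specification: first element of the tail that is ≤ price and nonzero (else 0)
def firstLE (p : Int) : List Int → Int
  | [] => 0
  | d :: rest => if d ≤ p ∧ d ≠ 0 then d else firstLE p rest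

-- the stack after a right-to-left pass over the list
def goodStack : List Int → List Int
  | [] => []
  | q :: rest => if q = 0 then goodStack rest else q :: pvPopB q (goodStack rest)

-- the last_neg value after a right-to-left pass over the list
def goodNeg : List Int → Int
  | [] => 0
  | q :: rest => if q = 0 then goodNeg rest else if q < 0 then q else goodNeg rest

-- ----- A-side characterisation -----
theorem pvWhileA_eq_firstLE (l : List Int) (price : Int) (di : Nat) :
    pvWhileA l price di = firstLE price (l.drop di) := by
  rw [pvWhileA]
  by_cases h : di < l.length
  · have hd : pvGetByIndex l di = l[di] := by
      simp [pvGetByIndex, h, List.getD_eq_getElem?_getD]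
    have hdrop : l.drop di = l[di] :: l.drop (di + 1) :=
      List.drop_eq_getElem_cons h
    by_cases hc : l[di] > price ∨ l[di] = 0
    · rw [if_pos ⟨h, by rw [hd]; exact hc⟩, pvWhileA_eq_firstLE l price (di + 1),
        hdrop, firstLE, if_neg (by omega)]
    · rw [if_neg (by rw [hd]; tauto), hdrop, firstLE, if_pos (by omega), hd]
  · have : l.drop di = [] := List.drop_eq_nil_of_le (by omega)
    simp [this, firstLE, pvGetByIndex, h]
termination_by l.length - di
decreasing_by omega

theorem recalculate_prices_eq (prices : List Int) :
    recalculate_prices prices =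
      match prices with
      | [] => []
      | p :: rest => (p - firstLE p rest) :: recalculate_prices rest := by
  cases prices with
  | nil => rfl
  | cons p rest =>
      simp only [recalculate_prices, pvWhileA_eq_firstLE]
      rfl

-- ----- B-side lemmas -----
theorem pvPopB_pvPopB (p q : Int) (hpq : p < q) (l : List Int) :
    pvPopB p (pvPopB q l) = pvPopB p l := by
  induction l with
  | nil => rfl
  | cons t st ih =>
      by_cases h : t > q
      · have : t > p := by omega
        simp [pvPopB, h, this, ih]
      · simp [pvPopB, h]

-- the query against the accumulated stack / last_neg computes firstLE
theorem goodNeg_eq_firstLE_zero (rest : List Int) :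
    goodNeg rest = firstLE 0 rest := by
  induction rest with
  | nil => rfl
  | cons q r ih =>
      by_cases h0 : q = 0
      · simp [goodNeg, firstLE, h0, ih]
      · by_cases hn : q < 0
        · simp [goodNeg, firstLE, h0, hn, (by omega : q ≤ 0)]
        · have : ¬ (q ≤ 0 ∧ q ≠ 0) := by omega
          simp only [goodNeg, firstLE, if_neg h0, if_neg hn, if_neg this, ih]

theorem stack_query_eq_firstLE (p : Int) (rest : List Int) :
    (pvPopB p (goodStack rest)).headD 0 = firstLE p rest := by
  induction rest with
  | nil => rfl
  | cons q r ih =>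
      rw [List.headD_eq_head?] at ih ⊢
      by_cases h0 : q = 0
      · have : ¬ (q ≤ p ∧ q ≠ 0) := by simp [h0]
        rw [goodStack, if_pos h0, firstLE, if_neg this, ih]
      · by_cases hple : q ≤ p
        · rw [goodStack, if_neg h0, firstLE, if_pos ⟨hple, h0⟩, pvPopB,
            if_neg (by omega : ¬ q > p)]
          rfl
        · have h1 : ¬ (q ≤ p ∧ q ≠ 0) := by tauto
          rw [goodStack, if_neg h0, firstLE, if_neg h1, pvPopB,
            if_pos (by omega : q > p), pvPopB_pvPopB p q (by omega), ih]

-- the whole fold state after processing `prices` right-to-left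
theorem foldB_eq (prices : List Int) :
    prices.reverse.foldl pvStepB ([], [], 0) =
      ((recalculate_prices prices).reverse, goodStack prices, goodNeg prices) := by
  induction prices with
  | nil => rfl
  | cons p rest ih =>
      have : (p :: rest).reverse.foldl pvStepB ([], [], 0) =
          pvStepB (rest.reverse.foldl pvStepB ([], [], 0)) p := by
        simp [List.reverse_cons, List.foldl_append]
      rw [this, ih, recalculate_prices_eq (p :: rest)]
      by_cases h0 : p = 0
      · have hd : firstLE p rest = goodNeg rest := by
          rw [h0, goodNeg_eq_firstLE_zero]
        simp [pvStepB, goodStack, goodNeg, h0, ← hd]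
      · have hd : (pvPopB p (goodStack rest)).headD 0 = firstLE p rest :=
          stack_query_eq_firstLE p rest
        rw [List.headD_eq_head?] at hd
        simp [pvStepB, goodStack, goodNeg, h0, hd]

-- ===== VERDICT (by name: the statement is the Claim_ definition above) =====
theorem recalculate_prices_spec : Claim_equal_recalculate_prices := by
  intro prices _
  unfold Spec_recalculate_prices recalculate_prices_alt
  rw [foldB_eq]
  simp
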